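-- pv_equiv track=rewrite | github.com/joaodrmacas/FP-Course | projfinal.py | obter_pin
-- ===== SOURCE A (Python) =====
-- board = [[0,0,0,0,0],[0,1,2,3,0],[0,4,5,6,0],[0,7,8,9,0],[0,0,0,0,0]]
--
-- def obter_posicao (direction, position):
--     # -------------------------------------------
--     #    obter_posicao: Calcula a nova posicão do tabuleiro dado uma posicao
--     #   inicial e uma direcao
--     #
--     #   Parameters:
--     #       direction: Direcao do movimento
--     #       position: Posicao inicial
--     #   Return:
--     #       new_pos: Nova posicao apos o movimento
--     #       position: Caso o movimento seja invalido (fora do board), mantem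
--     #   posicao
--     # -------------------------------------------
--     if direction == "C":
--         for i in range(0,5):
--             for j in range(0,5):
--                 if board[i][j] == position and board[i-1][j]!=0:
--                     new_pos = board[i-1][j]
--                     return new_pos
--
--     elif direction == "B":
--         for i in range(0,5):
--             for j in range(0,5):
--                 if board[i][j] == position and board[i+1][j]!=0:
--                     new_pos = board[i+1][j]
--                     return new_pos
--
--     elif direction == "D":
--         for i in range(0,5):
--             for j in range(0,5):
--                 if board[i][j] == position and board[i][j+1]!=0:
--                     new_pos = board[i][j+1]
--                     return new_pos
--
--     elif direction == "E":
--         for i in range(0,5):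
--             for j in range(0,5):
--                 if board[i][j] == position and board[i][j-1]!=0:
--                     new_pos = board[i][j-1]
--                     return new_pos
--
--     return position
--
-- def obter_digito (sequence, position):
--     # -------------------------------------------
--     #    obter_digito: Calcula a nova posicao apos uma serie de movimentos
--     #
--     #   Parameters:
--     #       sequence: Serie de movimentos
--     #       position: Posicao inicial
--     #   Return:
--     #       position: Posicao final
--     # -------------------------------------------
--     t_sequence = tuple(sequence)
--     for i in range(len(t_sequence)):
--         position = obter_posicao(t_sequence[i], position)
--     return position
--
-- def obter_pin(sequence_list):
--     # -------------------------------------------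
--     #    obter_pin: Calcula o pin codificado através do tuplo
--     #  "sequence_list". Valida os argumentos
--     #
--     #   Parameters:
--     #       sequence_list: Tuplo que contem diferentes sequencias de direcoes
--     #   Return:
--     #       pin: Pin Final
--     # -------------------------------------------
--     if type(sequence_list) != tuple or not( 4 <= len(sequence_list) <= 10 ):
--         raise ValueError("obter_pin: argumento invalido")
--     for sequence in sequence_list:
--         if not sequence.isalpha() or len(sequence) < 1:
--             raise ValueError("obter_pin: argumento invalido")
--         for letter in sequence:
--             if letter != "C" and letter != "B" and letter != "D" and letter != "E":
--                 raise ValueError("obter_pin: argumento invalido")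
--     pin = ()
--     pin += (obter_digito(sequence_list[0],5),)
--     for i in range(1,len(sequence_list)):
--         pin += (obter_digito(sequence_list[i],pin[i-1]),)
--     return pin
-- ===== SOURCE B (Python) =====
-- # B: precomputed transition table instead of rescanning the 5x5 board for every move.
-- MOVES = {}
-- for _r in range(3):
--     for _c in range(3):
--         _d = 3 * _r + _c + 1
--         if _r > 0:
--             MOVES[(_d, "C")] = _d - 3
--         if _r < 2:
--             MOVES[(_d, "B")] = _d + 3
--         if _c > 0:
--             MOVES[(_d, "E")] = _d - 1
--         if _c < 2:
--             MOVES[(_d, "D")] = _d + 1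
--
-- def obter_pin(sequence_list):
--     if type(sequence_list) != tuple or not (4 <= len(sequence_list) <= 10):
--         raise ValueError("obter_pin: argumento invalido")
--     for sequence in sequence_list:
--         if not sequence.isalpha() or any(ch not in "CBDE" for ch in sequence):
--             raise ValueError("obter_pin: argumento invalido")
--     pin = []
--     position = 5
--     for sequence in sequence_list:
--         for ch in sequence:
--             position = MOVES.get((position, ch), position)
--         pin.append(position)
--     return tuple(pin)
-- ===== Notes on version B (the rewrite author's own statement) =====
-- stated objective: faster
-- what changed: Replaces the per-move nested 5x5 board rescan in obter_posicao by a transition dict built once (move[(digit, direction)] = neighbour, .get with the position as default), and accumulates the PIN while carrying the current position instead of re-reading pin[i-1].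
import Mathlib
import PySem

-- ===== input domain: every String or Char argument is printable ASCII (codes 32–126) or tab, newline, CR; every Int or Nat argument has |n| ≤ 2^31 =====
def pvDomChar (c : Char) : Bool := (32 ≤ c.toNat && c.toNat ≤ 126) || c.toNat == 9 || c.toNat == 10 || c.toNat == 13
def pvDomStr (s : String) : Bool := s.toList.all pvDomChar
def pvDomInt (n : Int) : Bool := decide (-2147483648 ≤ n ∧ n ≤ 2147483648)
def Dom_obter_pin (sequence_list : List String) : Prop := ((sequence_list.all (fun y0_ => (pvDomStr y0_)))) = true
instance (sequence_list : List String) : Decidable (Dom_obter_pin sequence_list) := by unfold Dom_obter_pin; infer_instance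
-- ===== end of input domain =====

-- B replaces A's per-move rescan of the 5x5 board by a transition table built once; return-value
-- equivalence is proved on the inputs where the Python A returns (valid tuple of CBDE sequences).

-- ===== PORT A =====
def boardA : List (List Int) := [[0,0,0,0,0],[0,1,2,3,0],[0,4,5,6,0],[0,7,8,9,0],[0,0,0,0,0]]

-- board[i][j] with Python's negative-index wraparound; an out-of-range index yields 0
-- (in A such an access sits behind a short-circuit `and` whose left side is then false,
-- so Python never evaluates it on positions reachable from the start digit 5).
def cellA (i j : Int) : Int :=
  PySem.List.pyGetD (PySem.List.pyGetD boardA i []) j 0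

-- the nested `for i / for j` scan with early return, shared by A's four branches
-- (they differ only in the (di, dj) offset of the neighbour cell)
def scanA (position di dj : Int) : Option Int :=
  (PySem.List.pyRange 0 5 1).foldl (fun acc i =>
    (PySem.List.pyRange 0 5 1).foldl (fun acc j =>
      match acc with
      | some v => some v
      | none =>
          if cellA i j = position ∧ cellA (i + di) (j + dj) ≠ 0 then
            some (cellA (i + di) (j + dj))
          else none) acc) none

def obter_posicaoA (direction : Char) (position : Int) : Int :=
  if direction = 'C' then (scanA position (-1) 0).getD position
  else if direction = 'B' then (scanA position 1 0).getD position
  else if direction = 'D' then (scanA position 0 1).getD position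
  else if direction = 'E' then (scanA position 0 (-1)).getD position
  else position

def obter_digitoA (sequence : String) (position : Int) : Int :=
  sequence.toList.foldl (fun pos c => obter_posicaoA c pos) position

def obter_pin (sequence_list : List String) : List Int :=
  (PySem.List.pyRange 1 sequence_list.length 1).foldl
    (fun pin i =>
      pin ++ [obter_digitoA (PySem.List.pyGetD sequence_list i "")
                (PySem.List.pyGetD pin (i - 1) 0)])
    [obter_digitoA (PySem.List.pyGetD sequence_list 0 "") 5]

-- ===== PORT B =====
-- the MOVES table of Source B, built once by the same r/c loops
def MOVESB : PySem.Dict (Int × Char) Int :=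
  (PySem.List.pyRange 0 3 1).foldl (fun d r =>
    (PySem.List.pyRange 0 3 1).foldl (fun d c =>
      let dg := 3 * r + c + 1
      let d := if r > 0 then d.insert (dg, 'C') (dg - 3) else d
      let d := if r < 2 then d.insert (dg, 'B') (dg + 3) else d
      let d := if c > 0 then d.insert (dg, 'E') (dg - 1) else d
      if c < 2 then d.insert (dg, 'D') (dg + 1) else d) d) PySem.Dict.empty

def obter_pin_alt (sequence_list : List String) : List Int :=
  (sequence_list.foldl
    (fun (st : List Int × Int) sequence =>
      let position := sequence.toList.foldl
        (fun p ch => PySem.Dict.getD MOVESB (p, ch) p) st.2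
      (st.1 ++ [position], position))
    ([], 5)).1

-- ===== PRECONDITION & SPEC =====
-- Pre_ holds exactly where the Python A returns: a sequence tuple of length 4..10 whose entries are
-- nonempty strings over {C,B,D,E}; everywhere else A raises ValueError("obter_pin: argumento invalido").
def Pre_obter_pin (sequence_list : List String) : Prop :=
  4 ≤ sequence_list.length ∧ sequence_list.length ≤ 10 ∧
  sequence_list.all (fun s => !s.toList.isEmpty &&
    s.toList.all (fun c => c == 'C' || c == 'B' || c == 'D' || c == 'E')) = true
instance (sequence_list : List String) : Decidable (Pre_obter_pin sequence_list) := by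
  unfold Pre_obter_pin; infer_instance

def pvWitness_obter_pin : List String := ["C", "BD", "E", "CB"]

def Spec_obter_pin (sequence_list : List String) (out : List Int) : Prop := out = obter_pin_alt sequence_list
instance (sequence_list : List String) (out : List Int) : Decidable (Spec_obter_pin sequence_list out) := by unfold Spec_obter_pin; infer_instance

-- ===== CLAIM (what is proved, stated in full; the proofs are below) =====
def Claim_equal_obter_pin : Prop := ∀ (sequence_list : List String), Dom_obter_pin sequence_list → Pre_obter_pin sequence_list → Spec_obter_pin sequence_list (obter_pin sequence_list)

-- ===== LEMMAS AND PROOFS =====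

-- B's one-move step
def stepB (p : Int) (c : Char) : Int := PySem.Dict.getD MOVESB (p, c) p

def digitsL : List Int := [1, 2, 3, 4, 5, 6, 7, 8, 9]

-- on the nine keypad digits and the four directions, A's board scan and B's table agree,
-- and the result is again a keypad digit
-- evaluated form of the agreement, checked by the kernel
theorem step_agree_b :
    (digitsL.all fun p => ((['C', 'B', 'D', 'E'] : List Char).all fun c =>
      decide (obter_posicaoA c p = stepB p c ∧ stepB p c ∈ digitsL))) = true := by rfl

theorem step_agree :
    ∀ p ∈ digitsL, ∀ c ∈ (['C', 'B', 'D', 'E'] : List Char),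
      obter_posicaoA c p = stepB p c ∧ stepB p c ∈ digitsL := by
  intro p hp c hc
  exact of_decide_eq_true ((List.all_eq_true.mp ((List.all_eq_true.mp step_agree_b) p hp)) c hc)

theorem digito_agree (cs : List Char) (p : Int) (hp : p ∈ digitsL)
    (hc : ∀ c ∈ cs, c = 'C' ∨ c = 'B' ∨ c = 'D' ∨ c = 'E') :
    cs.foldl (fun pos c => obter_posicaoA c pos) p = cs.foldl stepB p ∧
      cs.foldl stepB p ∈ digitsL := by
  induction cs generalizing p with
  | nil => exact ⟨rfl, hp⟩
  | cons c cs ih =>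
    have hcm : c ∈ (['C', 'B', 'D', 'E'] : List Char) := by
      rcases hc c (by simp) with h | h | h | h <;> simp [h]
    obtain ⟨he, hd⟩ := step_agree p hp c hcm
    have := ih (stepB p c) hd (fun c hcc => hc c (by simp [hcc]))
    simpa [List.foldl_cons, he] using this

-- the scan both loops compute: accumulate digits while carrying the current position
def pvScan (g : String → Int → Int) (ss : List String) (st : List Int × Int) : List Int × Int :=
  ss.foldl (fun st s => (st.1 ++ [g s st.2], g s st.2)) st

-- A's indexed pyRange loop, with pin[i-1] as the carried position, equals pvScan on the remaining suffix
theorem A_loop_eq (g : String → Int → Int) (ss : List String) :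
    ∀ (a : Nat) (pin : List Int) (p : Int), pin.length = a → 1 ≤ a →
      PySem.List.pyGetD pin ((a : Int) - 1) 0 = p →
      (PySem.List.pyRange a ss.length 1).foldl
        (fun pin i => pin ++ [g (PySem.List.pyGetD ss i "") (PySem.List.pyGetD pin (i - 1) 0)]) pin
      = (pvScan g (ss.drop a) (pin, p)).1 := by
  intro a pin p hlen ha hlast
  induction h : ss.length - a generalizing a pin p with
  | zero =>
    have hba : (ss.length : Int) ≤ a := by omega
    rw [PySem.List.pyRange_one_eq_nil hba, List.drop_eq_nil_of_le (by omega)]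
    rfl
  | succ k ih =>
    have hab : (a : Int) < ss.length := by exact_mod_cast (by omega : a < ss.length)
    rw [PySem.List.pyRange_one_cons hab, List.foldl_cons]
    have hget : PySem.List.pyGetD ss (a : Int) "" = ss[a]'(by omega) := by
      rw [PySem.List.pyGetD_eq_getElem ss "" (by omega) hab]; simp
    have hdrop : ss.drop a = ss[a]'(by omega) :: ss.drop (a + 1) :=
      List.drop_eq_getElem_cons (by omega)
    have hlast' : PySem.List.pyGetD (pin ++ [g (ss[a]'(by omega)) p]) (((a + 1 : Nat) : Int) - 1) 0
        = g (ss[a]'(by omega)) p := by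
      have hcast : (((a + 1 : Nat) : Int) - 1) = ((a : Nat) : Int) := by push_cast; ring
      rw [hcast, PySem.List.pyGetD_natCast]
      simp [List.getD, ← hlen]
    have := ih (a + 1) (pin ++ [g (ss[a]'(by omega)) p]) (g (ss[a]'(by omega)) p)
      (by simp [hlen]) (by omega) hlast' (by omega)
    push_cast at this
    rw [hlast, hget, hdrop]
    simp only [pvScan, List.foldl_cons] at this ⊢
    exact this

-- pvScan with an agreeing step keeps the digit invariant and produces equal accumulators
theorem pvScan_congr (gA gB : String → Int → Int) (ss : List String)
    (hss : ∀ s ∈ ss, ∀ p ∈ digitsL, gA s p = gB s p ∧ gB s p ∈ digitsL) :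
    ∀ (acc : List Int) (p : Int), p ∈ digitsL →
      (pvScan gA ss (acc, p)).1 = (pvScan gB ss (acc, p)).1 := by
  induction ss with
  | nil => intro acc p _; rfl
  | cons s ss ih =>
    intro acc p hp
    obtain ⟨he, hd⟩ := hss s (by simp) p hp
    have := ih (fun s hs => hss s (by simp [hs])) (acc ++ [gB s p]) (gB s p) hd
    simpa [pvScan, he] using this

-- ===== VERDICT (by name: the statement is the Claim_ definition above) =====
theorem obter_pin_spec : Claim_equal_obter_pin := by
  intro ss _ hpre
  obtain ⟨h4, _, hall⟩ := hpre
  simp only [List.all_eq_true, Bool.and_eq_true, Bool.or_eq_true, beq_iff_eq] at hall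
  unfold Spec_obter_pin obter_pin obter_pin_alt
  obtain ⟨s0, rest, rfl⟩ : ∃ s0 rest, ss = s0 :: rest := by
    cases ss with
    | nil => simp at h4
    | cons a l => exact ⟨a, l, rfl⟩
  have hvalid : ∀ s ∈ s0 :: rest, ∀ p ∈ digitsL,
      obter_digitoA s p = s.toList.foldl stepB p ∧ s.toList.foldl stepB p ∈ digitsL := by
    intro s hs p hp
    refine digito_agree s.toList p hp (fun c hc => ?_)
    rcases (hall s hs).2 c hc with ((h | h) | h) | h <;> tauto
  have hget0 : PySem.List.pyGetD (s0 :: rest) (0 : Int) "" = s0 := by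
    rw [PySem.List.pyGetD_eq_getElem _ _ (by omega) (by simp)]; simp
  have h5 : (5 : Int) ∈ digitsL := by decide
  obtain ⟨he0, hd0⟩ := hvalid s0 (by simp) 5 h5
  have hA := A_loop_eq obter_digitoA (s0 :: rest) 1
      [obter_digitoA (PySem.List.pyGetD (s0 :: rest) 0 "") 5]
      (obter_digitoA (PySem.List.pyGetD (s0 :: rest) 0 "") 5) rfl (by omega)
      (by rw [show ((1 : Nat) : Int) - 1 = ((0 : Nat) : Int) by norm_num,
              PySem.List.pyGetD_natCast]; simp)
  push_cast at hA
  rw [hA]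
  show (pvScan obter_digitoA _ _).1
      = (pvScan (fun s p => s.toList.foldl stepB p) (s0 :: rest) ([], 5)).1
  have hBstep : pvScan (fun s p => s.toList.foldl stepB p) (s0 :: rest) ([], 5)
      = pvScan (fun s p => s.toList.foldl stepB p) rest
          ([s0.toList.foldl stepB 5], s0.toList.foldl stepB 5) := by
    simp [pvScan]
  rw [hBstep, hget0, he0]
  exact pvScan_congr obter_digitoA (fun s p => s.toList.foldl stepB p) rest
    (fun s hs p hp => hvalid s (by simp [hs]) p hp)
    [s0.toList.foldl stepB 5] (s0.toList.foldl stepB 5) hd0
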